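-- pv_equiv track=rewrite | github.com/Zeeeepa/graph-sitter | src/contexten/dashboard.py | _get_project_breakdown
-- ===== SOURCE A (Python) =====
-- from typing import Dict, List, Optional, Any
--
-- def _get_project_breakdown(flows: List[Dict]) -> Dict:
--     """Get breakdown of flows by project"""
--     project_breakdown = {}
--     for flow in flows:
--         project = flow.get("project", "unknown")
--         if project not in project_breakdown:
--             project_breakdown[project] = {"total": 0, "running": 0, "completed": 0, "failed": 0}
--
--         project_breakdown[project]["total"] += 1
--         project_breakdown[project][flow["status"]] = project_breakdown[project].get(flow["status"], 0) + 1
--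
--     return project_breakdown
-- ===== SOURCE B (Python) =====
-- def _get_project_breakdown(flows):
--     """Get breakdown of flows by project"""
--     groups = {}
--     for flow in flows:
--         groups.setdefault(flow.get("project", "unknown"), []).append(flow)
--     breakdown = {}
--     for project, group in groups.items():
--         counts = {"total": 0, "running": 0, "completed": 0, "failed": 0}
--         for flow in group:
--             counts["total"] += 1
--             status = flow["status"]
--             counts[status] = counts.get(status, 0) + 1
--         breakdown[project] = counts
--     return breakdown
-- ===== Notes on version B (the rewrite author's own statement) =====
-- stated objective: alternative
-- what changed: B replaces A's single interleaved scan over nested dicts with a two-phase decomposition: first build an insertion-ordered project->flows index, then count each group separately from a fresh seeded counts dict.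
import Mathlib
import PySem

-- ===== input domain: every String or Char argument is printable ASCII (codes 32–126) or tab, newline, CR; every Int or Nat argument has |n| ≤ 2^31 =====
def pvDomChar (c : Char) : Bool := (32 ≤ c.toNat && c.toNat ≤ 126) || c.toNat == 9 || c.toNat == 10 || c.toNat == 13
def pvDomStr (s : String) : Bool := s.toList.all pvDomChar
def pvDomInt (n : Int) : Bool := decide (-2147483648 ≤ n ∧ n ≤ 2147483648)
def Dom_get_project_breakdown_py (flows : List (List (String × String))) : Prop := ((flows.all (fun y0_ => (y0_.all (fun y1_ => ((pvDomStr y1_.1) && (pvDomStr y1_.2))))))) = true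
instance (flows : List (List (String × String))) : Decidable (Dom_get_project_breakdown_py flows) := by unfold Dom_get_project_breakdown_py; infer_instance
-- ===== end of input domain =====

-- B replaces A's single interleaved scan over nested dicts with a two-phase decomposition
-- (ordered project→flows index, then a per-group counting pass); same cost, no speed claim.

-- shared vocabulary of both Pythons: the seed dict literal and first-match lookup in a flow dict
def pvSeed : PySem.Dict String Int :=
  PySem.Dict.ofList [("total", 0), ("running", 0), ("completed", 0), ("failed", 0)]

def pvFlowGet (flow : List (String × String)) (k : String) : Option String :=
  (flow.find? (fun p => p.1 == k)).map (·.2)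

-- flow.get("project", "unknown")
def pvKey (flow : List (String × String)) : String := (pvFlowGet flow "project").getD "unknown"

-- ===== PORT A =====
-- one iteration of A's loop; the `none` branch is where Python raises KeyError (outside Pre_)
def pvStepA (d : PySem.Dict String (PySem.Dict String Int)) (flow : List (String × String)) :
    PySem.Dict String (PySem.Dict String Int) :=
  let project := pvKey flow
  let d1 := if d.contains project then d else d.insert project pvSeed
  let d2 := d1.modify project PySem.Dict.empty (fun inner => inner.modify "total" 0 (· + 1))
  match pvFlowGet flow "status" with
  | none => d2
  | some s => d2.modify project PySem.Dict.empty (fun inner => inner.modify s 0 (· + 1))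

def get_project_breakdown_py (flows : List (List (String × String))) :
    List (String × List (String × Int)) :=
  ((flows.foldl pvStepA PySem.Dict.empty).items).map (fun kv => (kv.1, kv.2.items))

-- ===== PORT B =====
-- phase 1: ordered index project → its flows (groups.setdefault(project, []).append(flow))
def pvGroups (flows : List (List (String × String))) :
    PySem.Dict String (List (List (String × String))) :=
  flows.foldl (fun g flow => g.modify (pvKey flow) [] (· ++ [flow])) PySem.Dict.empty

-- phase 2 inner loop: count one group from a fresh seeded counts dict
-- (the `none` branch is where Python raises KeyError, outside Pre_)
def pvCountGroup (group : List (List (String × String))) : PySem.Dict String Int :=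
  group.foldl
    (fun c flow =>
      let c1 := c.modify "total" 0 (· + 1)
      match pvFlowGet flow "status" with
      | none => c1
      | some s => c1.modify s 0 (· + 1))
    pvSeed

def get_project_breakdown_py_alt (flows : List (List (String × String))) :
    List (String × List (String × Int)) :=
  (((pvGroups flows).items).foldl
      (fun r pg => r.insert pg.1 (pvCountGroup pg.2).items)
      PySem.Dict.empty).items

-- ===== PRECONDITION & SPEC =====
-- Pre_ excludes exactly the inputs containing a flow without a "status" key,
-- on which the Python A raises KeyError (B raises there too).
def Pre_get_project_breakdown_py (flows : List (List (String × String))) : Prop :=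
  ∀ f ∈ flows, (pvFlowGet f "status").isSome = true
instance (flows : List (List (String × String))) : Decidable (Pre_get_project_breakdown_py flows) := by unfold Pre_get_project_breakdown_py; infer_instance

def pvWitness_get_project_breakdown_py : (List (List (String × String))) :=
  [[("project", "p1"), ("status", "running")], [("status", "failed")]]

def Spec_get_project_breakdown_py (flows : List (List (String × String))) (out : List (String × List (String × Int))) : Prop := out = get_project_breakdown_py_alt flows
instance (flows : List (List (String × String))) (out : List (String × List (String × Int))) : Decidable (Spec_get_project_breakdown_py flows out) := by unfold Spec_get_project_breakdown_py; infer_instance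

-- ===== CLAIM (what is proved, stated in full; the proofs are below) =====
def Claim_equal_get_project_breakdown_py : Prop := ∀ (flows : List (List (String × String))), Dom_get_project_breakdown_py flows → Pre_get_project_breakdown_py flows → Spec_get_project_breakdown_py flows (get_project_breakdown_py flows)

-- ===== LEMMAS AND PROOFS =====

-- the inner-dict update both loop bodies perform for one flow
def pvBump (c : PySem.Dict String Int) (flow : List (String × String)) : PySem.Dict String Int :=
  let c1 := c.modify "total" 0 (· + 1)
  match pvFlowGet flow "status" with
  | none => c1
  | some s => c1.modify s 0 (· + 1)

lemma pv_modify_eq {κ ν : Type} [BEq κ] (d : PySem.Dict κ ν) (k : κ) (d0 : ν) (f : ν → ν) :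
    d.modify k d0 f = d.insert k (f (d.getD k d0)) := rfl

lemma pv_getD_indep (d : PySem.Dict String (PySem.Dict String Int)) (k : String)
    (h : d.contains k = true) (a b : PySem.Dict String Int) : d.getD k a = d.getD k b := by
  rw [PySem.Dict.contains_eq_isSome_get?] at h
  obtain ⟨v, hv⟩ := Option.isSome_iff_exists.mp h
  rw [PySem.Dict.getD_eq_get?_getD, PySem.Dict.getD_eq_get?_getD, hv]; rfl

lemma pvStepA_eq (d : PySem.Dict String (PySem.Dict String Int)) (flow : List (String × String)) :
    pvStepA d flow = d.insert (pvKey flow) (pvBump (d.getD (pvKey flow) pvSeed) flow) := by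
  unfold pvStepA pvBump
  dsimp only
  set p := pvKey flow with hp
  by_cases hc : d.contains p = true
  · rw [if_pos hc]
    cases pvFlowGet flow "status" with
    | none => simp only [pv_modify_eq, pv_getD_indep d p hc PySem.Dict.empty pvSeed]
    | some s =>
        simp only [pv_modify_eq, PySem.Dict.getD_insert_self, PySem.Dict.insert_insert_self,
          pv_getD_indep d p hc PySem.Dict.empty pvSeed]
  · have hcf : d.contains p = false := by simpa using hc
    rw [if_neg hc]
    cases pvFlowGet flow "status" with
    | none =>
        simp only [pv_modify_eq, PySem.Dict.getD_insert_self, PySem.Dict.insert_insert_self,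
          PySem.Dict.getD_of_not_contains d pvSeed hcf]
    | some s =>
        simp only [pv_modify_eq, PySem.Dict.getD_insert_self, PySem.Dict.insert_insert_self,
          PySem.Dict.getD_of_not_contains d pvSeed hcf]

lemma pvStepA_fun :
    pvStepA = fun d x => d.insert (pvKey x) (pvBump (d.getD (pvKey x) pvSeed) x) :=
  funext fun d => funext fun x => pvStepA_eq d x

-- A's accumulator at key p counts exactly the p-filtered flows seen so far
lemma pvA_getD (flows : List (List (String × String)))
    (d : PySem.Dict String (PySem.Dict String Int)) (p : String) :
    (flows.foldl pvStepA d).getD p pvSeed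
      = (flows.filter (fun f => pvKey f == p)).foldl pvBump (d.getD p pvSeed) := by
  induction flows generalizing d with
  | nil => rfl
  | cons f fs ih =>
      rw [List.foldl_cons, ih, pvStepA_eq]
      by_cases h : pvKey f = p
      · simp [h, PySem.Dict.getD_insert_self]
      · have hb : (pvKey f == p) = false := by simpa using h
        have hne : p ≠ pvKey f := fun e => h e.symm
        simp [hb, PySem.Dict.getD_insert, hne]

lemma pvA_keys (flows : List (List (String × String))) :
    (flows.foldl pvStepA PySem.Dict.empty).keys = PySem.Set.ofList (flows.map pvKey) := by
  rw [pvStepA_fun, PySem.Dict.keys_foldl_insert_key flows pvKey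
        (fun d x => pvBump (d.getD (pvKey x) pvSeed) x) PySem.Dict.empty]
  simp [PySem.Dict.keys_empty, PySem.Set.update_nil_left]

lemma pvA_nodup (flows : List (List (String × String))) :
    (flows.foldl pvStepA PySem.Dict.empty).keys.Nodup := by
  rw [pvStepA_fun]
  exact PySem.Dict.nodup_keys_foldl_insert_key _ _ _ _ (by simp [PySem.Dict.keys_empty])

-- B's index at key p is exactly the p-filtered flows, in order
lemma pvGroups_getD (flows : List (List (String × String))) (p : String) :
    (pvGroups flows).getD p [] = flows.filter (fun f => pvKey f == p) := by
  unfold pvGroups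
  rw [show flows.foldl (fun g flow => g.modify (pvKey flow) [] (· ++ [flow])) PySem.Dict.empty
      = (flows.map (fun f => (pvKey f, f))).foldl
          (fun g q => g.modify q.1 [] (· ++ [q.2])) PySem.Dict.empty by
    rw [List.foldl_map]]
  rw [PySem.Dict.getD_foldl_modify_append]
  simp [List.filter_map, Function.comp_def, List.map_map]

lemma pvGroups_keys (flows : List (List (String × String))) :
    (pvGroups flows).keys = PySem.Set.ofList (flows.map pvKey) := by
  unfold pvGroups
  rw [PySem.Dict.keys_foldl_modify_key flows pvKey [] (fun _ x v => v ++ [x]) PySem.Dict.empty]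
  simp [PySem.Dict.keys_empty, PySem.Set.update_nil_left]

lemma pvGroups_nodup (flows : List (List (String × String))) :
    (pvGroups flows).keys.Nodup := by
  unfold pvGroups
  exact PySem.Dict.nodup_keys_foldl_modify_key _ _ _ _ _ (by simp [PySem.Dict.keys_empty])

lemma pvCountGroup_eq (group : List (List (String × String))) :
    pvCountGroup group = group.foldl pvBump pvSeed := rfl

lemma pv_main (flows : List (List (String × String))) :
    get_project_breakdown_py flows = get_project_breakdown_py_alt flows := by
  unfold get_project_breakdown_py get_project_breakdown_py_alt
  rw [PySem.Dict.items_eq_map_keys _ (pvA_nodup flows) pvSeed, pvA_keys]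
  have hfresh := PySem.Dict.items_foldl_insert_fresh (pvGroups flows).items
      (fun pg => pg.1) (fun pg => (pvCountGroup pg.2).items) PySem.Dict.empty
      (fun a _ => by simp [PySem.Dict.contains_empty])
      (by rw [show List.map (fun pg => pg.1) (pvGroups flows).items = (pvGroups flows).keys from rfl]
          exact pvGroups_nodup flows)
  beta_reduce at hfresh
  rw [hfresh]
  rw [PySem.Dict.items_eq_map_keys _ (pvGroups_nodup flows) [], pvGroups_keys]
  rw [show (PySem.Dict.empty.items ++
      List.map (fun a => (a.1, (pvCountGroup a.2).items))
        (List.map (fun k => (k, (pvGroups flows).getD k [])) (PySem.Set.ofList (List.map pvKey flows))))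
    = List.map (fun a => (a.1, (pvCountGroup a.2).items))
        (List.map (fun k => (k, (pvGroups flows).getD k [])) (PySem.Set.ofList (List.map pvKey flows)))
    from List.nil_append _]
  simp only [List.map_map]
  refine List.map_congr_left ?_
  intro p _
  simp only [Function.comp_def]
  rw [pvA_getD, pvGroups_getD, pvCountGroup_eq, PySem.Dict.getD_empty]

-- ===== VERDICT (by name: the statement is the Claim_ definition above) =====
theorem get_project_breakdown_py_spec : Claim_equal_get_project_breakdown_py := by
  intro flows _ _
  exact pv_main flows
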